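-- pv_equiv track=rewrite | github.com/robennals/libexpat-rust | validator/strict_compare/canonical_diff.py | _build_line_map
-- ===== SOURCE A (Python) =====
-- def _build_line_map(body: str) -> dict[str, list[int]]:
--     """Map tokens to their line numbers in the original body."""
--     result = {}
--     line = 1
--     tokens_with_lines = []
--     i = 0
--     while i < len(body):
--         c = body[i]
--         if c == '\n':
--             line += 1
--             i += 1
--             continue
--         if c in ' \t\r':
--             i += 1
--             continue
--         # Extract token at this position
--         if c.isalpha() or c == '_':
--             j = i + 1
--             while j < len(body) and (body[j].isalnum() or body[j] == '_'):
--                 j += 1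
--             token = body[i:j]
--             result.setdefault(token, []).append(line)
--             i = j
--         elif c.isdigit():
--             j = i + 1
--             while j < len(body) and (body[j].isalnum() or body[j] in '._'):
--                 j += 1
--             token = body[i:j]
--             result.setdefault(token, []).append(line)
--             i = j
--         else:
--             i += 1
--     return result
-- ===== SOURCE B (Python) =====
-- def _tokens(text):
--     """Extract the tokens of a single line (no newlines inside)."""
--     tokens = []
--     i = 0
--     n = len(text)
--     while i < n:
--         c = text[i]
--         if c.isalpha() or c == '_':
--             j = i + 1
--             while j < n and (text[j].isalnum() or text[j] == '_'):
--                 j += 1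
--             tokens.append(text[i:j])
--             i = j
--         elif c.isdigit():
--             j = i + 1
--             while j < n and (text[j].isalnum() or text[j] in '._'):
--                 j += 1
--             tokens.append(text[i:j])
--             i = j
--         else:
--             i += 1
--     return tokens
--
--
-- def _build_line_map(body: str) -> dict[str, list[int]]:
--     """Map tokens to their line numbers in the original body."""
--     result = {}
--     for line_no, text in enumerate(body.split('\n'), 1):
--         for token in _tokens(text):
--             result.setdefault(token, []).append(line_no)
--     return result
-- ===== Notes on version B (the rewrite author's own statement) =====
-- stated objective: alternative
-- what changed: B splits the body into lines first and tokenizes each line independently with enumerate(..., 1) over a separate token-extraction helper, replacing A's single index-based scan over the whole string that threads a manual line counter and the dict through one loop.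
import Mathlib
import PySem

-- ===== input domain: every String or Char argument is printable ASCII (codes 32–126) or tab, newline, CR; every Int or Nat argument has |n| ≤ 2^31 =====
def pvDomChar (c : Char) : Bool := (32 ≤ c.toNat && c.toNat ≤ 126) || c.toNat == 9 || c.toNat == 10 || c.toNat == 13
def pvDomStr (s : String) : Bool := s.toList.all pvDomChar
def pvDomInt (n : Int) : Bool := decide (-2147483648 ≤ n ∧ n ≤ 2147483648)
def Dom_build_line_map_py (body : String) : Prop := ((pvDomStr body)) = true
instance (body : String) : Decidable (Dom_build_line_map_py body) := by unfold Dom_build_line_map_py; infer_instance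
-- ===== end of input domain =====

-- B re-decomposes A: split the body into lines first, then tokenize each line independently
-- (same return value; objective: alternative decomposition, same cost).

-- continuation character class after an alpha/underscore start: body[j].isalnum() or body[j] == '_'
def pvContA (c : Char) : Bool := c.isAlphanum || c == '_'
-- continuation character class after a digit start: body[j].isalnum() or body[j] in '._'
def pvContD (c : Char) : Bool := c.isAlphanum || c == '.' || c == '_'

-- ===== PORT A =====
-- A's single while-loop over character positions, threading the line counter and the dict;
-- the inner 'while j < len(body) and pred(body[j])' is takeWhile/dropWhile on the tail,
-- and result.setdefault(token, []).append(line) is insert (getD ++ [line]) (overwrite keeps position).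
def pvScanA : List Char → Int → PySem.Dict String (List Int) → PySem.Dict String (List Int)
  | [], _, d => d
  | c :: rest, line, d =>
    if c == '\n' then pvScanA rest (line + 1) d
    else if c == ' ' || c == '\t' || c == '\r' then pvScanA rest line d
    else if c.isAlpha || c == '_' then
      let tk := String.mk (c :: rest.takeWhile pvContA)
      pvScanA (rest.dropWhile pvContA) line (d.insert tk (d.getD tk [] ++ [line]))
    else if c.isDigit then
      let tk := String.mk (c :: rest.takeWhile pvContD)
      pvScanA (rest.dropWhile pvContD) line (d.insert tk (d.getD tk [] ++ [line]))
    else pvScanA rest line d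
termination_by cs _ _ => cs.length
decreasing_by
  · simp
  · simp
  · exact Nat.lt_succ_of_le (List.length_dropWhile_le _ _)
  · exact Nat.lt_succ_of_le (List.length_dropWhile_le _ _)
  · simp

def build_line_map_py (body : String) : List (String × List Int) :=
  (pvScanA body.toList 1 PySem.Dict.empty).items

-- ===== PORT B =====
-- B's helper _tokens(text): the tokens of one line, in order.
def pvTokens : List Char → List String
  | [] => []
  | c :: rest =>
    if c.isAlpha || c == '_' then
      String.mk (c :: rest.takeWhile pvContA) :: pvTokens (rest.dropWhile pvContA)
    else if c.isDigit then
      String.mk (c :: rest.takeWhile pvContD) :: pvTokens (rest.dropWhile pvContD)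
    else pvTokens rest
termination_by cs => cs.length
decreasing_by
  · exact Nat.lt_succ_of_le (List.length_dropWhile_le _ _)
  · exact Nat.lt_succ_of_le (List.length_dropWhile_le _ _)
  · simp

-- B's outer loop: for line_no, text in enumerate(body.split('\n'), 1): for token in _tokens(text): …
def pvLinesLoop : List (List Char) → Int → PySem.Dict String (List Int) → PySem.Dict String (List Int)
  | [], _, d => d
  | t :: ts, line, d =>
      pvLinesLoop ts (line + 1)
        ((pvTokens t).foldl (fun d tk => d.insert tk (d.getD tk [] ++ [line])) d)

def build_line_map_py_alt (body : String) : List (String × List Int) :=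
  (pvLinesLoop (PySem.Chars.splitOn body.toList ['\n']) 1 PySem.Dict.empty).items

-- ===== PRECONDITION & SPEC =====
def Spec_build_line_map_py (body : String) (out : List (String × List Int)) : Prop := out = build_line_map_py_alt body
instance (body : String) (out : List (String × List Int)) : Decidable (Spec_build_line_map_py body out) := by unfold Spec_build_line_map_py; infer_instance

-- ===== CLAIM (what is proved, stated in full; the proofs are below) =====
def Claim_equal_build_line_map_py : Prop := ∀ (body : String), Dom_build_line_map_py body → Spec_build_line_map_py body (build_line_map_py body)

-- ===== LEMMAS AND PROOFS =====

-- reference single-char split on '\n' used by the proof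
def pvConsHead (pre : List Char) : List (List Char) → List (List Char)
  | [] => [pre]
  | h :: t => (pre ++ h) :: t

def pvSplit : List Char → List (List Char)
  | [] => [[]]
  | c :: r => if c == '\n' then [] :: pvSplit r else pvConsHead [c] (pvSplit r)

theorem pvSplit_ne_nil (cs : List Char) : pvSplit cs ≠ [] := by
  induction cs with
  | nil => simp [pvSplit]
  | cons c r ih =>
    simp only [pvSplit]
    split
    · simp
    · cases h : pvSplit r <;> simp [pvConsHead]

theorem pvConsHead_comp (p1 p2 : List Char) (L : List (List Char)) :
    pvConsHead p1 (pvConsHead p2 L) = pvConsHead (p1 ++ p2) L := by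
  cases L <;> simp [pvConsHead]

theorem pvConsHead_nil (L : List (List Char)) (h : L ≠ []) : pvConsHead [] L = L := by
  cases L with
  | nil => exact absurd rfl h
  | cons a t => simp [pvConsHead]

-- PySem.Chars.splitOn with separator "\n" is pvSplit
theorem pvSplit_go (fuel : Nat) : ∀ (l cur : List Char) (acc : List (List Char)),
    l.length ≤ fuel →
    PySem.Chars.splitOn.go ['\n'] fuel l cur acc = acc.reverse ++ pvConsHead cur.reverse (pvSplit l) := by
  induction fuel with
  | zero =>
    intro l cur acc hl
    have : l = [] := List.length_eq_zero_iff.mp (Nat.le_zero.mp hl)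
    subst this
    simp [PySem.Chars.splitOn.go, pvSplit, pvConsHead]
  | succ f ih =>
    intro l cur acc hl
    cases l with
    | nil => simp [PySem.Chars.splitOn.go, pvSplit, pvConsHead]
    | cons c rest =>
      by_cases hc : c = '\n'
      · subst hc
        have : PySem.Chars.splitOn.go ['\n'] (f + 1) ('\n' :: rest) cur acc
            = PySem.Chars.splitOn.go ['\n'] f rest [] (cur.reverse :: acc) := by
          simp [PySem.Chars.splitOn.go, List.isPrefixOf]
        rw [this, ih rest [] (cur.reverse :: acc) (by simpa using Nat.succ_le_succ_iff.mp hl)]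
        simp only [List.reverse_nil]
        rw [pvConsHead_nil _ (pvSplit_ne_nil rest)]
        simp [pvSplit, pvConsHead]
      · have : PySem.Chars.splitOn.go ['\n'] (f + 1) (c :: rest) cur acc
            = PySem.Chars.splitOn.go ['\n'] f rest (c :: cur) acc := by
          simp [PySem.Chars.splitOn.go, List.isPrefixOf]
          intro h; exact absurd h.symm hc
        rw [this, ih rest (c :: cur) acc (by simpa using Nat.succ_le_succ_iff.mp hl)]
        simp [pvSplit, hc, pvConsHead_comp]
  
theorem splitOn_eq_pvSplit (cs : List Char) : PySem.Chars.splitOn cs ['\n'] = pvSplit cs := by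
  unfold PySem.Chars.splitOn
  rw [pvSplit_go (cs.length + 1) cs [] [] (Nat.le_succ _)]
  simpa using pvConsHead_nil _ (pvSplit_ne_nil cs)

-- the head of pvSplit q starts with q's first character (unless q is empty or starts with '\n')
theorem head?_headI_pvSplit (q : List Char) :
    (pvSplit q).headI.head? = if q.head? = some '\n' then none else q.head? := by
  cases q with
  | nil => simp [pvSplit]
  | cons c r =>
    by_cases hc : c = '\n'
    · subst hc; simp [pvSplit]
    · simp only [pvSplit, beq_iff_eq, if_neg hc]
      cases h : pvSplit r <;> simp [pvConsHead, hc]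

-- after dropWhile p, the head of the first split chunk fails p (p must reject '\n')
theorem takeWhile_headI_pvSplit (p : Char → Bool) (_hp : p '\n' = false) (rest : List Char) :
    ((pvSplit (rest.dropWhile p)).headI).takeWhile p = [] ∧
    ((pvSplit (rest.dropWhile p)).headI).dropWhile p = (pvSplit (rest.dropWhile p)).headI := by
  set q := rest.dropWhile p with hq
  have hqh : ∀ x, q.head? = some x → p x = false := by
    intro x hx
    have h := List.head?_dropWhile_not p rest
    rw [← hq] at h
    rw [hx] at h
    exact h
  have hhead := head?_headI_pvSplit q
  cases hh : ((pvSplit q).headI) with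
  | nil => simp
  | cons x t =>
    have hx : (pvSplit q).headI.head? = some x := by rw [hh]; rfl
    rw [hhead] at hx
    have hpx : p x = false := by
      by_cases hn : q.head? = some '\n'
      · simp [hn] at hx
      · rw [if_neg hn] at hx
        exact hqh x hx
    constructor
    · simp [List.takeWhile, hpx]
    · simp [List.dropWhile, hpx]

-- takeWhile/dropWhile through (take ++ h) when every char of take continues and h's head stops
theorem pv_take_drop_append (p : Char → Bool) (take h : List Char)
    (htake : ∀ a ∈ take, p a = true) (hh : h.takeWhile p = []) (hh' : h.dropWhile p = h) :
    (take ++ h).takeWhile p = take ∧ (take ++ h).dropWhile p = h := by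
  have h1 : take.takeWhile p = take := List.takeWhile_eq_self_iff.mpr htake
  have h2 : take.dropWhile p = [] := List.dropWhile_eq_nil_iff.mpr htake
  constructor
  · rw [List.takeWhile_append]
    simp [h1, hh]
  · rw [List.dropWhile_append]
    simp [h2, hh']

-- pvSplit of a newline-free prefix prepends it onto the first chunk of the remainder
theorem pvSplit_append (pre q : List Char) (hpre : ∀ a ∈ pre, a ≠ '\n') :
    pvSplit (pre ++ q) = pvConsHead pre (pvSplit q) := by
  induction pre with
  | nil => simpa using (pvConsHead_nil _ (pvSplit_ne_nil q)).symm
  | cons a p ih =>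
    have ha : a ≠ '\n' := hpre a (by simp)
    simp only [List.cons_append, pvSplit, beq_iff_eq, if_neg ha]
    rw [ih (fun x hx => hpre x (by simp [hx]))]
    rw [pvConsHead_comp]
    rfl

theorem pvSplit_exists_cons (q : List Char) : ∃ h t, pvSplit q = h :: t := by
  cases hsp : pvSplit q with
  | nil => exact absurd hsp (pvSplit_ne_nil q)
  | cons h t => exact ⟨h, t, rfl⟩

-- skipping a non-token, non-newline character changes neither side
theorem pvTokens_skip (c : Char) (h : List Char)
    (ha : (c.isAlpha || c == '_') = false) (hd : c.isDigit = false) :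
    pvTokens (c :: h) = pvTokens h := by
  simp [pvTokens, ha, hd]

-- the main invariant: A's scan over cs starting at line equals B's per-line loop over pvSplit cs
theorem scan_eq_linesLoop (cs : List Char) (line : Int) (d : PySem.Dict String (List Int)) :
    pvScanA cs line d = pvLinesLoop (pvSplit cs) line d := by
  induction cs, line, d using pvScanA.induct with
  | case1 x d => simp [pvScanA, pvSplit, pvLinesLoop, pvTokens]
  | case2 c rest line d hc ih =>
    have hc' : c = '\n' := by simpa using hc
    subst hc'
    rw [show pvScanA ('\n' :: rest) line d = pvScanA rest (line + 1) d from by simp [pvScanA]]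
    rw [ih]
    simp [pvSplit, pvLinesLoop, pvTokens]
  | case3 c rest line d hn hw ih =>
    have hn' : c ≠ '\n' := by simpa using hn
    have hca : (c.isAlpha || c == '_') = false := by
      rcases (by simpa using hw : (c = ' ' ∨ c = '\t') ∨ c = '\x0d') with (h | h) | h <;> subst h <;> decide
    have hcd : c.isDigit = false := by
      rcases (by simpa using hw : (c = ' ' ∨ c = '\t') ∨ c = '\x0d') with (h | h) | h <;> subst h <;> decide
    rw [show pvScanA (c :: rest) line d = pvScanA rest line d from by simp [pvScanA, hn, hw]]
    rw [ih]
    obtain ⟨h, t, hht⟩ := pvSplit_exists_cons rest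
    simp only [pvSplit, beq_iff_eq, if_neg hn', hht, pvConsHead, List.singleton_append,
      pvLinesLoop, pvTokens_skip c h hca hcd]
  | case4 c rest line d hn hw hca _tk ih =>
    have hn' : c ≠ '\n' := by simpa using hn
    have hcontn : pvContA '\n' = false := by decide
    obtain ⟨h, t, hht⟩ := pvSplit_exists_cons (rest.dropWhile pvContA)
    have hheadI := takeWhile_headI_pvSplit pvContA hcontn rest
    rw [hht] at hheadI
    simp only [List.headI] at hheadI
    have htake : ∀ a ∈ rest.takeWhile pvContA, pvContA a = true :=
      fun a haa => List.mem_takeWhile_imp haa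
    have htaken : ∀ a ∈ rest.takeWhile pvContA, a ≠ '\n' := by
      intro a haa he; subst he; rw [htake _ haa] at hcontn; exact Bool.true_eq_false.mp hcontn
    have hsplit : pvSplit (c :: rest) = (c :: (rest.takeWhile pvContA ++ h)) :: t := by
      conv_lhs => rw [show (c :: rest) = (c :: rest.takeWhile pvContA) ++ rest.dropWhile pvContA
        from by rw [List.cons_append, List.takeWhile_append_dropWhile]]
      rw [pvSplit_append _ _ (by intro a haa; rcases List.mem_cons.mp haa with h' | h'
                                 · exact h' ▸ hn'
                                 · exact htaken a h')]
      rw [hht]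
      simp [pvConsHead]
    have htd := pv_take_drop_append pvContA (rest.takeWhile pvContA) h htake hheadI.1 hheadI.2
    have htoks : pvTokens (c :: (rest.takeWhile pvContA ++ h))
        = String.mk (c :: rest.takeWhile pvContA) :: pvTokens h := by
      simp only [pvTokens, if_pos hca, htd.1, htd.2]
    rw [show pvScanA (c :: rest) line d =
        pvScanA (rest.dropWhile pvContA) line
          ((d.insert (String.mk (c :: rest.takeWhile pvContA))
            (d.getD (String.mk (c :: rest.takeWhile pvContA)) [] ++ [line])))
      from by rw [pvScanA]; simp [hn, hw, hca]]
    rw [ih, hht, hsplit]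
    simp only [pvLinesLoop, htoks, List.foldl_cons]
    rfl
  | case5 c rest line d hn hw hca hcd _tk ih =>
    have hn' : c ≠ '\n' := by simpa using hn
    have hcontn : pvContD '\n' = false := by decide
    obtain ⟨h, t, hht⟩ := pvSplit_exists_cons (rest.dropWhile pvContD)
    have hheadI := takeWhile_headI_pvSplit pvContD hcontn rest
    rw [hht] at hheadI
    simp only [List.headI] at hheadI
    have htake : ∀ a ∈ rest.takeWhile pvContD, pvContD a = true :=
      fun a haa => List.mem_takeWhile_imp haa
    have htaken : ∀ a ∈ rest.takeWhile pvContD, a ≠ '\n' := by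
      intro a haa he; subst he; rw [htake _ haa] at hcontn; exact Bool.true_eq_false.mp hcontn
    have hsplit : pvSplit (c :: rest) = (c :: (rest.takeWhile pvContD ++ h)) :: t := by
      conv_lhs => rw [show (c :: rest) = (c :: rest.takeWhile pvContD) ++ rest.dropWhile pvContD
        from by rw [List.cons_append, List.takeWhile_append_dropWhile]]
      rw [pvSplit_append _ _ (by intro a haa; rcases List.mem_cons.mp haa with h' | h'
                                 · exact h' ▸ hn'
                                 · exact htaken a h')]
      rw [hht]
      simp [pvConsHead]
    have htd := pv_take_drop_append pvContD (rest.takeWhile pvContD) h htake hheadI.1 hheadI.2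
    have htoks : pvTokens (c :: (rest.takeWhile pvContD ++ h))
        = String.mk (c :: rest.takeWhile pvContD) :: pvTokens h := by
      simp only [pvTokens, hca, Bool.false_eq_true, if_false, if_pos hcd, htd.1, htd.2]
    rw [show pvScanA (c :: rest) line d =
        pvScanA (rest.dropWhile pvContD) line
          ((d.insert (String.mk (c :: rest.takeWhile pvContD))
            (d.getD (String.mk (c :: rest.takeWhile pvContD)) [] ++ [line])))
      from by rw [pvScanA]; simp [hn, hw, hca, hcd]]
    rw [ih, hht, hsplit]
    simp only [pvLinesLoop, htoks, List.foldl_cons]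
    rfl
  | case6 c rest line d hn hw hca hcd ih =>
    have hn' : c ≠ '\n' := by simpa using hn
    rw [show pvScanA (c :: rest) line d = pvScanA rest line d from by
      rw [pvScanA]; simp [hn, hw, hca, hcd]]
    rw [ih]
    obtain ⟨h, t, hht⟩ := pvSplit_exists_cons rest
    simp only [pvSplit, beq_iff_eq, if_neg hn', hht, pvConsHead, List.singleton_append,
      pvLinesLoop, pvTokens_skip c h (by simpa using hca) (by simpa using hcd)]

-- ===== VERDICT (by name: the statement is the Claim_ definition above) =====
theorem build_line_map_py_spec : Claim_equal_build_line_map_py := by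
  intro body _
  unfold Spec_build_line_map_py build_line_map_py build_line_map_py_alt
  rw [splitOn_eq_pvSplit, scan_eq_linesLoop]
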